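-- pv_equiv track=rewrite | github.com/ronGeva/algorithms | cracking_the_coding_interview/ex_17_23.py | build_max_row_matrix
-- ===== SOURCE A (Python) =====
-- def build_max_row_matrix(input_matrix: list[list[bool]]):
--     matrix = [[0 for _ in range(len(row))] for row in input_matrix]
--     for row_index in range(len(input_matrix)):
--         row = input_matrix[row_index]
--         current_max_subsequent_cells = 0
--         for col_index in range(len(row) - 1, -1, -1):
--             if row[col_index]:
--                 current_max_subsequent_cells += 1
--             else:
--                 current_max_subsequent_cells = 0
--             matrix[row_index][col_index] = current_max_subsequent_cells
--     return matrix
-- ===== SOURCE B (Python) =====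
-- from itertools import groupby
--
--
-- def build_max_row_matrix(input_matrix: list[list[bool]]):
--     result = []
--     for row in input_matrix:
--         out = []
--         for val, grp in groupby(row, bool):
--             k = sum(1 for _ in grp)
--             if val:
--                 out.extend(range(k, 0, -1))
--             else:
--                 out.extend([0] * k)
--         result.append(out)
--     return result
-- ===== Notes on version B (the rewrite author's own statement) =====
-- stated objective: alternative
-- what changed: Replaces the reverse right-to-left accumulator over a preallocated zero matrix with a left-to-right run-grouping pass (itertools.groupby): each True-run of length k emits the countdown k..1, each False-run emits zeros, building fresh rows.
import Mathlib
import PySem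

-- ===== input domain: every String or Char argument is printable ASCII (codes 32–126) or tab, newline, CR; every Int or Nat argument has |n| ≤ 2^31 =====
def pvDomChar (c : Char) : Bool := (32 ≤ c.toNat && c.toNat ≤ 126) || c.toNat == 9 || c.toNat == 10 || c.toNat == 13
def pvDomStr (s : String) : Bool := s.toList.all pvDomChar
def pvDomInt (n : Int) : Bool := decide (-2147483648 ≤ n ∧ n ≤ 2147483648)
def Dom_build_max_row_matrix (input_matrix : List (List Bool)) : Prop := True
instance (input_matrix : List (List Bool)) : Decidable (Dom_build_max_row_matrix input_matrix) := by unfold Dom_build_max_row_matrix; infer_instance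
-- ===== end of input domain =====

-- B replaces A's reverse right-to-left accumulator with a left-to-right run-grouping pass
-- (each True-run of length k yields the countdown k..1, False cells yield 0): alternative decomposition, same cost.


-- ===== PORT A =====
-- A's inner loop: col_index runs from len-1 down to 0 with an accumulator, writing into a
-- zero row that is fully overwritten; ported as a fold over the reversed row carrying
-- (current_max_subsequent_cells, cells written so far, in original order).
def pvRowA (row : List Bool) : List Int :=
  (row.reverse.foldl
    (fun (st : Int × List Int) b =>
      let c : Int := if b then st.1 + 1 else 0
      (c, c :: st.2))
    (0, [])).2

def build_max_row_matrix (input_matrix : List (List Bool)) : List (List Int) :=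
  input_matrix.map pvRowA

-- ===== PORT B =====
-- B's inner loop: group the row into maximal runs; a True-run of length k emits k, k-1, …, 1
-- (range(k, 0, -1)), a False cell emits 0.
def pvRowB : List Bool → List Int
  | [] => []
  | false :: t => 0 :: pvRowB t
  | true :: t =>
      let k := (t.takeWhile (fun b => b)).length + 1
      (List.range k).map (fun (i : Nat) => (k : Int) - (i : Int)) ++ pvRowB (t.dropWhile (fun b => b))
termination_by row => row.length
decreasing_by
  · simp
  · have := List.length_dropWhile_le (p := fun b => b) (l := t)
    simp; omega

def build_max_row_matrix_alt (input_matrix : List (List Bool)) : List (List Int) :=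
  input_matrix.map pvRowB

-- ===== PRECONDITION & SPEC =====
def Spec_build_max_row_matrix (input_matrix : List (List Bool)) (out : List (List Int)) : Prop := out = build_max_row_matrix_alt input_matrix
instance (input_matrix : List (List Bool)) (out : List (List Int)) : Decidable (Spec_build_max_row_matrix input_matrix out) := by unfold Spec_build_max_row_matrix; infer_instance

-- ===== CLAIM (what is proved, stated in full; the proofs are below) =====
def Claim_equal_build_max_row_matrix : Prop := ∀ (input_matrix : List (List Bool)), Dom_build_max_row_matrix input_matrix → Spec_build_max_row_matrix input_matrix (build_max_row_matrix input_matrix)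

-- ===== LEMMAS AND PROOFS =====

-- reference recursion: out[i] = out[i+1]+1 if row[i] else 0
def pvRowS : List Bool → List Int
  | [] => []
  | b :: t => (if b then (pvRowS t).headD 0 + 1 else 0) :: pvRowS t

theorem pvRowA_foldr (row : List Bool) :
    row.foldr (fun b (st : Int × List Int) =>
        let c : Int := if b then st.1 + 1 else 0
        (c, c :: st.2)) (0, []) = ((pvRowS row).headD 0, pvRowS row) := by
  induction row with
  | nil => simp [pvRowS]
  | cons b t ih => simp [pvRowS, ih]

theorem pvRowA_eq_S (row : List Bool) : pvRowA row = pvRowS row := by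
  unfold pvRowA
  rw [List.foldl_reverse, pvRowA_foldr]

theorem pvRowS_true (t : List Bool) :
    pvRowS (true :: t) =
      (List.range ((t.takeWhile (fun b => b)).length + 1)).map
        (fun (i : Nat) => (((t.takeWhile (fun b => b)).length + 1 : Nat) : Int) - (i : Int))
      ++ pvRowS (t.dropWhile (fun b => b)) := by
  induction t with
  | nil => simp [pvRowS]
  | cons b t ih =>
    cases b with
    | false => simp [pvRowS]
    | true =>
      have h1 : pvRowS (true :: true :: t) =
          ((pvRowS (true :: t)).headD 0 + 1) :: pvRowS (true :: t) := by
        simp [pvRowS]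
      rw [h1, ih]
      have hk : (List.takeWhile (fun b => b) (true :: t)).length
          = (List.takeWhile (fun b => b) t).length + 1 := by simp
      set k := (List.takeWhile (fun b => b) t).length with hkdef
      have hrange : List.range (k + 1 + 1) = 0 :: (List.range (k + 1)).map Nat.succ := by
        rw [List.range_succ_eq_map]
      have hdrop : List.dropWhile (fun b => b) (true :: t) = List.dropWhile (fun b => b) t := rfl
      rw [hk, hdrop, hrange]
      simp only [List.map_cons, List.map_map, List.cons_append]
      congr 1
      · -- head of the run-countdown is k+1, so adding 1 gives k+2
        simp [List.range_succ_eq_map]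
      · congr 1
        apply List.map_congr_left
        intro i _
        simp [Function.comp]

theorem pvRowB_eq_S (row : List Bool) : pvRowB row = pvRowS row := by
  induction row using pvRowB.induct with
  | case1 => simp [pvRowB, pvRowS]
  | case2 t ih => simp [pvRowB, pvRowS, ih]
  | case3 t ih =>
    rw [pvRowB, ih, ← pvRowS_true]

-- ===== VERDICT (by name: the statement is the Claim_ definition above) =====
theorem build_max_row_matrix_spec : Claim_equal_build_max_row_matrix := by
  intro input_matrix _
  unfold Spec_build_max_row_matrix build_max_row_matrix build_max_row_matrix_alt
  exact List.map_congr_left (fun row _ => by rw [pvRowA_eq_S, pvRowB_eq_S])
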